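-- pv_equiv track=rewrite | github.com/WZR8277/RonBot | nanobot/rag/engine.py | _normalize_bm25_token
-- ===== SOURCE A (Python) =====
-- def _normalize_bm25_token(w: str) -> str:
--     """去掉首尾非字母数字字符，使 **autogen** 与 autogen 能匹配。"""
--     if not w:
--         return w
--     start, end = 0, len(w)
--     while start < end and not w[start].isalnum() and not ("\u4e00" <= w[start] <= "\u9fff"):
--         start += 1
--     while end > start and not w[end - 1].isalnum() and not ("\u4e00" <= w[end - 1] <= "\u9fff"):
--         end -= 1
--     return w[start:end].lower() if start < end else w.lower()
-- ===== SOURCE B (Python) =====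
-- def _normalize_bm25_token(w: str) -> str:
--     idxs = [i for i, c in enumerate(w) if c.isalnum() or "\u4e00" <= c <= "\u9fff"]
--     if idxs:
--         return w[idxs[0]:idxs[-1] + 1].lower()
--     return w.lower()
-- ===== Notes on version B (the rewrite author's own statement) =====
-- stated objective: simpler
-- what changed: Replaces the two early-stopping boundary pointer loops with a single forward pass that collects the indices of all kept characters and slices between the first and last of them.
import Mathlib
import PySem

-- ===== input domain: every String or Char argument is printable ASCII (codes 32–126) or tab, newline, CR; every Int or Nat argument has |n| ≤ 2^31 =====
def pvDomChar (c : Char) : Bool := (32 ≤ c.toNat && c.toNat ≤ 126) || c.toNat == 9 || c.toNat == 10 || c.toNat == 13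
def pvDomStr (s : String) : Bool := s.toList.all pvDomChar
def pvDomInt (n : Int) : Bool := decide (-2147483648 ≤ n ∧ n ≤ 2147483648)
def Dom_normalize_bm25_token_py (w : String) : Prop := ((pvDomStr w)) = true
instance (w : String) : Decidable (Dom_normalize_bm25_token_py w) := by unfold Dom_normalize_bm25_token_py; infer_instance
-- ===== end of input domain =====

-- B replaces A's two boundary-pointer while loops by one forward pass that records the
-- indices of all kept characters and slices between the first and last of them (simpler).

-- ===== PORT A =====
-- w[i].isalnum() or "\u4e00" <= w[i] <= "\u9fff"
def pvKeptChar (c : Char) : Bool :=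
  PySem.Chars.isalnum c || (decide (0x4e00 ≤ c.toNat) && decide (c.toNat ≤ 0x9fff))

-- the first while loop: number of characters skipped from the front
def pvLeadSkip : List Char → Nat
  | [] => 0
  | c :: t => if pvKeptChar c then 0 else pvLeadSkip t + 1

def normalize_bm25_token_py (w : String) : String :=
  let cs := w.toList
  if cs.isEmpty then w
  else
    let start := pvLeadSkip cs
    let rest := cs.drop start            -- w[start:]
    -- second while loop: scans downwards from the end, i.e. forwards over the reverse
    let e := rest.length - pvLeadSkip rest.reverse
    if 0 < e then String.ofList (PySem.Chars.lower (rest.take e))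
    else String.ofList (PySem.Chars.lower cs)

-- ===== PORT B =====
def normalize_bm25_token_py_alt (w : String) : String :=
  let cs := w.toList
  -- idxs = [i for i, c in enumerate(w) if c.isalnum() or "\u4e00" <= c <= "\u9fff"]
  let idxs := ((PySem.List.enumerate cs).filter (fun p => pvKeptChar p.2)).map (·.1)
  if idxs.isEmpty then String.ofList (PySem.Chars.lower cs)
  else String.ofList (PySem.Chars.lower
    (PySem.List.slice cs (some (idxs.headD 0)) (some (idxs.getLastD 0 + 1))))

-- ===== PRECONDITION & SPEC =====
def Spec_normalize_bm25_token_py (w : String) (out : String) : Prop := out = normalize_bm25_token_py_alt w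
instance (w : String) (out : String) : Decidable (Spec_normalize_bm25_token_py w out) := by unfold Spec_normalize_bm25_token_py; infer_instance

-- ===== CLAIM (what is proved, stated in full; the proofs are below) =====
def Claim_equal_normalize_bm25_token_py : Prop := ∀ (w : String), Dom_normalize_bm25_token_py w → Spec_normalize_bm25_token_py w (normalize_bm25_token_py w)

-- ===== LEMMAS AND PROOFS =====

-- positions (as Nats) of the kept characters
def pvKeptPos : List Char → List Nat
  | [] => []
  | c :: t => if pvKeptChar c then 0 :: (pvKeptPos t).map (· + 1) else (pvKeptPos t).map (· + 1)

theorem pvIdxs_eq (cs : List Char) (s : Int) :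
    ((PySem.List.enumerate cs s).filter (fun p => pvKeptChar p.2)).map (·.1)
      = (pvKeptPos cs).map (fun (k : Nat) => ((s + k : Int))) := by
  induction cs generalizing s with
  | nil => simp [pvKeptPos, PySem.List.enumerate_nil]
  | cons c t ih =>
    simp only [PySem.List.enumerate_cons, List.filter_cons, pvKeptPos]
    by_cases h : pvKeptChar c
    · simp only [h, if_pos, ih, List.map_cons, List.map_map]
      refine List.cons_eq_cons.mpr ⟨by simp, ?_⟩
      apply List.map_congr_left; intro k _; simp; ring
    · simp only [h, Bool.false_eq_true, if_false, ih, List.map_map]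
      apply List.map_congr_left; intro k _; simp; ring

theorem pvKeptPos_nil_iff (cs : List Char) :
    pvKeptPos cs = [] ↔ cs.dropWhile (fun c => !pvKeptChar c) = [] := by
  induction cs with
  | nil => simp [pvKeptPos]
  | cons c t ih =>
    by_cases h : pvKeptChar c
    · simp [pvKeptPos, h]
    · simp [pvKeptPos, h, ih]

theorem pvDrop_leadSkip (cs : List Char) :
    cs.drop (pvLeadSkip cs) = cs.dropWhile (fun c => !pvKeptChar c) := by
  induction cs with
  | nil => rfl
  | cons c t ih =>
    by_cases h : pvKeptChar c <;> simp [pvLeadSkip, h, List.dropWhile_cons, ih]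

theorem pvKeptPos_head (cs : List Char) (k : Nat) (r : List Nat) (h : pvKeptPos cs = k :: r) :
    k = pvLeadSkip cs := by
  induction cs generalizing k r with
  | nil => simp [pvKeptPos] at h
  | cons c t ih =>
    by_cases hc : pvKeptChar c
    · simp [pvKeptPos, hc] at h
      simp [pvLeadSkip, hc, h.1]
    · simp [pvKeptPos, hc] at h
      cases ht : pvKeptPos t with
      | nil => rw [ht] at h; simp at h
      | cons k' r' =>
        rw [ht] at h; simp at h
        have := ih k' r' ht
        simp [pvLeadSkip, hc, ← h.1, this]

theorem pvKeptPos_le (cs : List Char) (k : Nat) (h : k ∈ pvKeptPos cs) :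
    pvLeadSkip cs ≤ k ∧ k < cs.length := by
  induction cs generalizing k with
  | nil => simp [pvKeptPos] at h
  | cons c t ih =>
    by_cases hc : pvKeptChar c
    · simp [pvKeptPos, hc] at h
      rcases h with h | ⟨k', hk', rfl⟩
      · simp [pvLeadSkip, hc, h]
      · have := ih k' hk'
        simp [pvLeadSkip, hc]; omega
    · simp [pvKeptPos, hc] at h
      rcases h with ⟨k', hk', rfl⟩
      have := ih k' hk'
      simp [pvLeadSkip, hc]; omega

theorem pvKeptPos_snoc (t : List Char) (c : Char) :
    pvKeptPos (t ++ [c]) = pvKeptPos t ++ (if pvKeptChar c then [t.length] else []) := by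
  induction t with
  | nil => by_cases h : pvKeptChar c <;> simp [pvKeptPos, h]
  | cons d t ih =>
    by_cases hd : pvKeptChar d <;> by_cases hc : pvKeptChar c <;>
      simp [pvKeptPos, hd, hc, ih]

theorem pvKeptPos_last (cs : List Char) (h : pvKeptPos cs ≠ []) :
    (pvKeptPos cs).getLastD 0 + 1 + pvLeadSkip cs.reverse = cs.length := by
  induction cs using List.reverseRecOn with
  | nil => simp [pvKeptPos] at h
  | append_singleton t c ih =>
    rw [pvKeptPos_snoc] at h ⊢
    by_cases hc : pvKeptChar c
    · simp [hc, List.reverse_append, pvLeadSkip]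
    · simp [hc] at h ⊢
      have := ih h
      simp [List.reverse_append, pvLeadSkip, hc, List.getLastD_eq_getLast?] at this ⊢
      omega

theorem pvLeadSkip_append (l l' : List Char) (h : ∃ c ∈ l, pvKeptChar c) :
    pvLeadSkip (l ++ l') = pvLeadSkip l := by
  induction l with
  | nil => simp at h
  | cons c t ih =>
    by_cases hc : pvKeptChar c
    · simp [pvLeadSkip, hc]
    · simp [pvLeadSkip, hc]
      apply ih
      rcases h with ⟨d, hd, hk⟩
      rcases List.mem_cons.mp hd with rfl | hd
      · simp [hk] at hc
      · exact ⟨d, hd, hk⟩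

theorem pvTrail_dropWhile (cs : List Char)
    (h : cs.dropWhile (fun c => !pvKeptChar c) ≠ []) :
    pvLeadSkip (cs.dropWhile (fun c => !pvKeptChar c)).reverse = pvLeadSkip cs.reverse := by
  induction cs with
  | nil => simp at h
  | cons c t ih =>
    by_cases hc : pvKeptChar c
    · simp [List.dropWhile_cons, hc]
    · rw [List.dropWhile_cons] at h ⊢
      simp only [hc, Bool.not_false, if_pos] at h ⊢
      rw [ih h, List.reverse_cons]
      have hex : ∃ d ∈ t.reverse, pvKeptChar d := by
        rw [Ne, List.dropWhile_eq_nil_iff] at h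
        push_neg at h
        rcases h with ⟨d, hd, hk⟩
        exact ⟨d, List.mem_reverse.mpr hd, by simpa using hk⟩
      rw [pvLeadSkip_append _ _ hex]

theorem pv_main (w : String) : normalize_bm25_token_py w = normalize_bm25_token_py_alt w := by
  unfold normalize_bm25_token_py normalize_bm25_token_py_alt
  simp only [pvIdxs_eq]
  cases hP : pvKeptPos w.toList with
  | nil =>
    simp only [List.map_nil, List.isEmpty_nil, if_pos]
    by_cases hE : w.toList.isEmpty
    · simp only [hE, if_pos]
      have h0 : w.toList = [] := by simpa using hE
      have hw : w = "" := by
        have := congrArg String.ofList h0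
        rwa [String.ofList_toList] at this
      rw [hw]
      rfl
    · simp only [hE, Bool.false_eq_true]
      have hd : w.toList.dropWhile (fun c => !pvKeptChar c) = [] := (pvKeptPos_nil_iff _).mp hP
      have h1 : w.toList.drop (pvLeadSkip w.toList) = [] := by rw [pvDrop_leadSkip, hd]
      simp [h1]
  | cons k r =>
    have hne : w.toList ≠ [] := by
      intro h0; rw [h0] at hP; simp [pvKeptPos] at hP
    have hE : w.toList.isEmpty = false := by simpa using hne
    have hk : k = pvLeadSkip w.toList := pvKeptPos_head _ _ _ hP
    have hjm : (pvKeptPos w.toList).getLastD 0 ∈ pvKeptPos w.toList := by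
      rw [hP]
      rw [List.getLastD_eq_getLast? ]
      have := List.getLast?_eq_some_getLast (l := k :: r) (by simp)
      rw [this]
      exact List.getLast_mem _
    obtain ⟨hij, hjl⟩ := pvKeptPos_le _ _ hjm
    have hj : (pvKeptPos w.toList).getLastD 0 + 1 + pvLeadSkip w.toList.reverse = w.toList.length :=
      pvKeptPos_last _ (by rw [hP]; simp)
    have hdw : w.toList.dropWhile (fun c => !pvKeptChar c) ≠ [] := by
      intro h0
      rw [← pvKeptPos_nil_iff] at h0
      rw [h0] at hP; simp at hP
    have hT : pvLeadSkip (w.toList.drop (pvLeadSkip w.toList)).reverse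
        = pvLeadSkip w.toList.reverse := by
      rw [pvDrop_leadSkip]; exact pvTrail_dropWhile _ hdw
    set j := (pvKeptPos w.toList).getLastD 0 with hjdef
    set i := pvLeadSkip w.toList with hidef
    have hlen : (w.toList.drop i).length = w.toList.length - i := by simp
    have hiL : i ≤ w.toList.length := by omega
    have he : (w.toList.drop i).length - pvLeadSkip (w.toList.drop i).reverse = j + 1 - i := by
      rw [hT, hlen]; omega
    have hpos : 0 < (w.toList.drop i).length - pvLeadSkip (w.toList.drop i).reverse := by
      rw [he]; omega
    simp only [hE, Bool.false_eq_true, if_false, List.map_cons, List.isEmpty_cons]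
    rw [if_pos hpos, he]
    -- B side: headD, getLastD of the mapped index list
    have hhead : (((0 : Int) + k) :: r.map (fun (k : Nat) => ((0 + k : Int)))).headD 0 = (k : Int) := by
      simp
    have hlast : (((0 : Int) + k) :: r.map (fun (k : Nat) => ((0 + k : Int)))).getLastD 0 = (j : Int) := by
      rw [List.getLastD_eq_getLast?]
      have : ((0 : Int) + k) :: r.map (fun (k : Nat) => ((0 + k : Int)))
          = (k :: r).map (fun (k : Nat) => ((0 + k : Int))) := by simp
      rw [this, List.getLast?_map]
      rw [hjdef, hP, List.getLastD_eq_getLast?,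
        List.getLast?_eq_some_getLast (l := k :: r) (by simp)]
      simp
    rw [hhead, hlast]
    have hslice : PySem.List.slice w.toList (some (k : Int)) (some ((j : Int) + 1))
        = (w.toList.drop k).take (j + 1 - k) := by
      rw [PySem.List.slice_toNat]
      · norm_num
      · positivity
      · positivity
    rw [hslice, hk]

-- ===== VERDICT (by name: the statement is the Claim_ definition above) =====
theorem normalize_bm25_token_py_spec : Claim_equal_normalize_bm25_token_py := by
  intro w _
  exact pv_main w
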